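-- pv_equiv track=rewrite | github.com/BH-Fang/HomeWork | 114-1/038.py | getLastIndexs
-- ===== SOURCE A (Python) =====
-- def getLastIndexs(L, Ei):
--     indexs = []
--     for item in Ei:
--         item_len = len(item)
--         for i in range(len(L) - item_len + 1):
--             if item == L[i: i + item_len]:
--                 indexs.append(i)
--     return indexs
-- ===== SOURCE B (Python) =====
-- def getLastIndexs(L, Ei):
--     # Index L once: value -> ascending list of positions; per pattern only candidate starts are verified.
--     n = len(L)
--     pos = {}
--     for i, x in enumerate(L):
--         pos.setdefault(x, []).append(i)
--     out = []
--     for pat in Ei: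
--         m = len(pat)
--         if m == 0:
--             out.extend(range(n + 1))
--             continue
--         rest = pat[1:]
--         for i in pos.get(pat[0], ()):
--             if i + m <= n and L[i + 1:i + m] == rest:
--                 out.append(i)
--     return out
-- ===== Notes on version B (the rewrite author's own statement) =====
-- stated objective: alternative
-- what changed: B builds a value->positions index over L once and, per pattern, verifies only the candidate positions of the pattern's first element (comparing the remaining tail slice), instead of A's full scan of all windows for every pattern.
import Mathlib
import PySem

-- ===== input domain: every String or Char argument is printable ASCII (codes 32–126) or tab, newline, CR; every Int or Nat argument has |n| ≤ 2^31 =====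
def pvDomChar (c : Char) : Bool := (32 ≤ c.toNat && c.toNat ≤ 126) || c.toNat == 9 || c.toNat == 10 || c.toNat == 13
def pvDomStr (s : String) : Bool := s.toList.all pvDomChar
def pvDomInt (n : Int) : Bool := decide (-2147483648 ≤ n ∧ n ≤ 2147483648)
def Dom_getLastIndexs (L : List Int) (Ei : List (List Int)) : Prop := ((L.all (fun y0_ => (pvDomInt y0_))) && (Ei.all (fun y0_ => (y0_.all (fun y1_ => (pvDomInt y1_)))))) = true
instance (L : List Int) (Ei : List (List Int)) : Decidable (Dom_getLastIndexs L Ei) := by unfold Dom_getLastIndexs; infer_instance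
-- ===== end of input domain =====

-- B builds a value->positions index over L once and, per pattern, checks only the candidate
-- start positions of the pattern's first element, instead of A's full window scan per pattern
-- (objective: alternative algorithm; same worst-case cost).

-- ===== PORT A =====
def getLastIndexs (L : List Int) (Ei : List (List Int)) : List Int :=
  Ei.foldl (fun indexs item =>
    let item_len : Int := item.length
    (PySem.List.pyRange 0 ((L.length : Int) - item_len + 1) 1).foldl
      (fun indexs i =>
        if item = PySem.List.slice L (some i) (some (i + item_len)) then indexs ++ [i] else indexs)
      indexs) []

-- ===== PORT B =====
def getLastIndexs_alt (L : List Int) (Ei : List (List Int)) : List Int :=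
  let n : Int := L.length
  let pos : PySem.Dict Int (List Int) :=
    (PySem.List.enumerate L 0).foldl (fun d p => d.modify p.2 [] (· ++ [p.1])) PySem.Dict.empty
  Ei.foldl (fun out pat =>
    match pat with
    | [] => out ++ PySem.List.pyRange 0 (n + 1) 1
    | h :: rest =>
      let m : Int := pat.length
      (pos.getD h []).foldl (fun out i =>
        if i + m ≤ n ∧ PySem.List.slice L (some (i + 1)) (some (i + m)) = rest then out ++ [i] else out)
        out) []

-- ===== PRECONDITION & SPEC =====
def Spec_getLastIndexs (L : List Int) (Ei : List (List Int)) (out : List Int) : Prop := out = getLastIndexs_alt L Ei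
instance (L : List Int) (Ei : List (List Int)) (out : List Int) : Decidable (Spec_getLastIndexs L Ei out) := by unfold Spec_getLastIndexs; infer_instance

-- ===== CLAIM (what is proved, stated in full; the proofs are below) =====
def Claim_equal_getLastIndexs : Prop := ∀ (L : List Int) (Ei : List (List Int)), Dom_getLastIndexs L Ei → Spec_getLastIndexs L Ei (getLastIndexs L Ei)

-- ===== LEMMAS AND PROOFS =====

-- Folding "append index i under key p.2" gives, per key, the filtered-and-projected list.
theorem getD_fold_swap (l : List (Int × Int)) (d : PySem.Dict Int (List Int)) (c : Int) :
    (l.foldl (fun d p => d.modify p.2 [] (· ++ [p.1])) d).getD c []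
      = d.getD c [] ++ (l.filter (fun p => p.2 == c)).map (·.1) := by
  induction l generalizing d with
  | nil => simp
  | cons p t ih =>
    rw [List.foldl_cons, ih, PySem.Dict.getD_modify]
    by_cases hc : c = p.2
    · simp [hc]
    · have hne : (p.2 == c) = false := by
        simp only [beq_eq_false_iff_ne, ne_eq]
        exact fun hh => hc hh.symm
      simp [hc, hne]

-- The position dictionary returns, for each value h, exactly the ascending indices i with L[i] = h.
theorem pos_getD (L : List Int) (h : Int) :
    ((PySem.List.enumerate L 0).foldl (fun d p => d.modify p.2 [] (· ++ [p.1])) PySem.Dict.empty).getD h []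
      = (PySem.List.pyRange 0 (L.length : Int) 1).filter (fun i => PySem.List.pyGetD L i 0 == h) := by
  rw [getD_fold_swap, PySem.Dict.getD_empty, PySem.List.enumerate_eq_map_pyRange L 0,
      List.filter_map, List.map_map]
  simp [Function.comp_def, PySem.List.len]

-- Pointwise characterisation of a window match for a nonempty pattern.
theorem match_iff (L : List Int) (hd : Int) (rest : List Int) (i : Int)
    (h0 : 0 ≤ i) (hn : i < (L.length : Int)) :
    (hd :: rest = PySem.List.slice L (some i) (some (i + ((hd :: rest).length : Int))))
      ↔ (PySem.List.pyGetD L i 0 = hd ∧ i + ((hd :: rest).length : Int) ≤ (L.length : Int)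
          ∧ PySem.List.slice L (some (i + 1)) (some (i + ((hd :: rest).length : Int))) = rest) := by
  have hm : (((hd :: rest).length : Int)) = (rest.length : Int) + 1 := by simp
  rw [hm]
  have hb : 0 ≤ i + ((rest.length : Int) + 1) := by omega
  rw [PySem.List.slice_toNat L h0 hb, PySem.List.slice_toNat L (by omega) hb,
      PySem.List.pyGetD_eq_getElem L 0 h0 hn]
  have hk : i.toNat < L.length := by omega
  have e1 : (i + ((rest.length : Int) + 1)).toNat - i.toNat = rest.length + 1 := by omega
  have e2 : (i + ((rest.length : Int) + 1)).toNat - (i + 1).toNat = rest.length := by omega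
  have e3 : (i + 1).toNat = i.toNat + 1 := by omega
  rw [e1, e2, e3, List.drop_eq_getElem_cons hk, List.take_succ_cons]
  constructor
  · intro hEq
    rw [List.cons.injEq] at hEq
    obtain ⟨hh, ht⟩ := hEq
    have hlen := congrArg List.length ht
    simp [List.length_take, List.length_drop] at hlen
    exact ⟨hh.symm, by omega, ht.symm⟩
  · rintro ⟨hh, _, ht⟩
    rw [List.cons.injEq]
    exact ⟨hh.symm, ht.symm⟩

-- Shrinking the filtered range when the predicate forces the index below N.
theorem filter_pyRange_shrink (N n : Int) (P : Int → Bool) (hNn : N ≤ n)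
    (h : ∀ i, 0 ≤ i → i < n → P i = true → i < N) :
    (PySem.List.pyRange 0 n 1).filter P = (PySem.List.pyRange 0 N 1).filter P := by
  by_cases hN : 0 ≤ N
  · rw [PySem.List.pyRange_one_append 0 N n hN hNn, List.filter_append]
    have hz : (PySem.List.pyRange N n 1).filter P = [] := by
      rw [List.filter_eq_nil_iff]
      intro i hi
      rw [PySem.List.mem_pyRange_one] at hi
      intro hP
      exact absurd (h i (by omega) hi.2 hP) (by omega)
    simp [hz]
  · have l1 : PySem.List.pyRange 0 N 1 = [] := PySem.List.pyRange_one_eq_nil (by omega)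
    have l2 : (PySem.List.pyRange 0 n 1).filter P = [] := by
      rw [List.filter_eq_nil_iff]
      intro i hi
      rw [PySem.List.mem_pyRange_one] at hi
      intro hP
      exact absurd (h i hi.1 hi.2 hP) (by omega)
    simp [l1, l2]

-- ===== VERDICT (by name: the statement is the Claim_ definition above) =====
theorem getLastIndexs_spec : Claim_equal_getLastIndexs := by
  intro L Ei _
  show getLastIndexs L Ei = getLastIndexs_alt L Ei
  unfold getLastIndexs getLastIndexs_alt
  apply List.foldl_ext
  intro acc pat _
  cases pat with
  | nil =>
    dsimp only
    rw [PySem.List.foldl_append_ite_eq_filter]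
    have hb : ((L.length : Int) - (([] : List Int).length : Int) + 1) = (L.length : Int) + 1 := by
      simp
    rw [hb]
    congr 1
    rw [List.filter_eq_self]
    intro i hi
    rw [PySem.List.mem_pyRange_one] at hi
    have hs : PySem.List.slice L (some i) (some i) = [] := by
      rw [PySem.List.slice_toNat L hi.1 hi.1]; simp
    simp [hs]
  | cons h rest =>
    dsimp only
    rw [PySem.List.foldl_append_ite_eq_filter, PySem.List.foldl_append_ite_eq_filter,
        pos_getD, List.filter_filter]
    congr 1
    have hm : (((h :: rest).length : Int)) = (rest.length : Int) + 1 := by simp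
    have step1 : (PySem.List.pyRange 0 ((L.length : Int) - ((h :: rest).length : Int) + 1) 1).filter
        (fun i => decide (h :: rest = PySem.List.slice L (some i) (some (i + ((h :: rest).length : Int)))))
        = (PySem.List.pyRange 0 (L.length : Int) 1).filter
        (fun i => decide (h :: rest = PySem.List.slice L (some i) (some (i + ((h :: rest).length : Int))))) := by
      refine (filter_pyRange_shrink _ _ _ (by omega) ?_).symm
      intro i hi0 hin hP
      rw [decide_eq_true_iff] at hP
      have hmm := (match_iff L h rest i hi0 hin).1 hP
      omega
    rw [step1]
    apply List.filter_congr
    intro i hi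
    rw [PySem.List.mem_pyRange_one] at hi
    rw [Bool.eq_iff_iff]
    simp only [decide_eq_true_iff, Bool.and_eq_true, beq_iff_eq]
    rw [match_iff L h rest i hi.1 hi.2]
    tauto
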